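-- pv_equiv track=rewrite | github.com/Charbelghanime/RSA-flask-applicatioon | Flask455ojojo (3)/Flask455ojojo/Flask455/app.py | get_blocks_from_text
-- ===== SOURCE A (Python) =====
-- DEFAULT_BLOCK_SIZE = 128
--
-- BYTE_SIZE = 128
--
-- def get_blocks_from_text(message, block_size=DEFAULT_BLOCK_SIZE):
--     message_bytes = message.encode('ascii')
--     block_ints = []
--
--     for block_start in range(0, len(message_bytes), block_size):
--         block_int = 0
--         for i in range(block_start, min(block_start + block_size, len(message_bytes))):
--             block_int += message_bytes[i] * (BYTE_SIZE ** (i % block_size))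
--         block_ints.append(block_int)
--
--     return block_ints
-- ===== SOURCE B (Python) =====
-- DEFAULT_BLOCK_SIZE = 128
--
-- BYTE_SIZE = 128
--
--
-- def _horner(chunk):
--     value = 0
--     for byte in reversed(chunk):
--         value = value * BYTE_SIZE + byte
--     return value
--
--
-- def get_blocks_from_text(message, block_size=DEFAULT_BLOCK_SIZE):
--     data = message.encode('ascii')
--     return [_horner(data[start:start + block_size])
--             for start in range(0, len(data), block_size)]
-- ===== Notes on version B (the rewrite author's own statement) =====
-- stated objective: faster
-- what changed: Instead of an accumulator loop that recomputes BYTE_SIZE ** (i % block_size) for every byte, B maps a Horner evaluation (one multiply-add per byte over the reversed block slice) over the block starts with a list comprehension.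
import Mathlib
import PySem

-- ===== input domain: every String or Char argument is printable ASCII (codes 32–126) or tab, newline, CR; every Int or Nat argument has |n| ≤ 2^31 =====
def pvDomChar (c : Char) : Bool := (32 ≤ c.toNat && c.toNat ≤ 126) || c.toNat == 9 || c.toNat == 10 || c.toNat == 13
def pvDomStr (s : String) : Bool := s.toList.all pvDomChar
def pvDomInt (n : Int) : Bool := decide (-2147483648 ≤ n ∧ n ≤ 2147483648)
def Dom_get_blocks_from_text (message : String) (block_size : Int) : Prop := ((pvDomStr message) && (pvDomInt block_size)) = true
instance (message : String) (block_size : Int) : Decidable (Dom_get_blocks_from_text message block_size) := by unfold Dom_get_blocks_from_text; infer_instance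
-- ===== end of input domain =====

-- B replaces A's per-byte pow BYTE_SIZE ** (i % block_size) with a Horner evaluation mapped over the block slices.


-- ===== PORT A =====
-- message.encode('ascii') is the list of code points (exact on Dom, which admits only ASCII);
-- the exponent i % block_size is nonnegative whenever the inner loop runs, so `.toNat` on it is exact.
def get_blocks_from_text (message : String) (block_size : Int) : List Int :=
  let message_bytes : List Int := message.toList.map (fun c => (c.toNat : Int))
  (PySem.List.pyRange 0 (message_bytes.length : Int) block_size).foldl
    (fun block_ints block_start =>
      let block_int :=
        (PySem.List.pyRange block_start
            (min (block_start + block_size) (message_bytes.length : Int)) 1).foldl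
          (fun acc i =>
            acc + PySem.List.pyGetD message_bytes i 0 *
              (128 : Int) ^ (PySem.Int.mod i block_size).toNat)
          0
      block_ints ++ [block_int])
    []

-- ===== PORT B =====
-- _horner: the for-loop over reversed(chunk) as tail recursion on the reversed chunk
def pvHorner : List Int → Int → Int
  | [], value => value
  | byte :: rest, value => pvHorner rest (value * 128 + byte)

def get_blocks_from_text_alt (message : String) (block_size : Int) : List Int :=
  let data : List Int := message.toList.map (fun c => (c.toNat : Int))
  (PySem.List.pyRange 0 (data.length : Int) block_size).map
    (fun start => pvHorner (PySem.List.slice data (some start) (some (start + block_size))).reverse 0)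

-- ===== PRECONDITION & SPEC =====
-- Pre_ excludes only block_size = 0, on which both Pythons raise ValueError (range() arg 3 must not be zero).
def Pre_get_blocks_from_text (message : String) (block_size : Int) : Prop := block_size ≠ 0
instance (message : String) (block_size : Int) : Decidable (Pre_get_blocks_from_text message block_size) := by unfold Pre_get_blocks_from_text; infer_instance
def pvWitness_get_blocks_from_text : String × Int := ("Hi there", 3)

def Spec_get_blocks_from_text (message : String) (block_size : Int) (out : List Int) : Prop := out = get_blocks_from_text_alt message block_size
instance (message : String) (block_size : Int) (out : List Int) : Decidable (Spec_get_blocks_from_text message block_size out) := by unfold Spec_get_blocks_from_text; infer_instance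

-- ===== CLAIM (what is proved, stated in full; the proofs are below) =====
def Claim_equal_get_blocks_from_text : Prop := ∀ (message : String) (block_size : Int), Dom_get_blocks_from_text message block_size → Pre_get_blocks_from_text message block_size → Spec_get_blocks_from_text message block_size (get_blocks_from_text message block_size)

-- ===== LEMMAS AND PROOFS =====

-- little-endian base-128 value of a byte list
def base128 : List Int → Int
  | [] => 0
  | b :: t => b + 128 * base128 t

theorem pvHorner_eq_foldl (l : List Int) (acc : Int) :
    pvHorner l acc = l.foldl (fun n b => n * 128 + b) acc := by
  induction l generalizing acc with
  | nil => rfl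
  | cons x xs ih => simp [pvHorner, ih]

theorem horner_eq_base128 (l : List Int) :
    pvHorner l.reverse 0 = base128 l := by
  rw [pvHorner_eq_foldl]
  induction l with
  | nil => simp [base128]
  | cons x xs ih =>
      simp only [List.reverse_cons, List.foldl_append, List.foldl_cons, List.foldl_nil, ih, base128]
      ring

theorem foldl_add_eq_sum (f : Int → Int) (L : List Int) (acc : Int) :
    L.foldl (fun a i => a + f i) acc = acc + (L.map f).sum := by
  induction L generalizing acc with
  | nil => simp
  | cons x xs ih => simp [ih]; ring

theorem base128_eq_sum (l : List Int) :
    base128 l = ((List.range l.length).map (fun k => l.getD k 0 * 128 ^ k)).sum := by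
  induction l with
  | nil => simp [base128]
  | cons x xs ih =>
      simp only [base128, ih, List.length_cons, List.range_succ_eq_map, List.map_cons,
        List.map_map, List.sum_cons]
      congr 1
      · simp
      · rw [← List.sum_map_mul_left]
        refine congrArg List.sum (List.map_congr_left ?_)
        intro k _
        simp [pow_succ]
        ring

theorem pyRange_neg_nil (a b s : Int) (hs : s < 0) (hab : a ≤ b) :
    PySem.List.pyRange a b s = [] := by
  simp only [PySem.List.pyRange]
  rw [if_neg (by omega)]
  simp only [if_neg (not_lt.mpr hs.le), if_neg (not_lt.mpr hab)]
  simp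

theorem foldl_append_eq_map {α : Type} (L : List α) (f : α → Int) (init : List Int) :
    L.foldl (fun acc x => acc ++ [f x]) init = init ++ L.map f := by
  induction L generalizing init with
  | nil => simp
  | cons x xs ih => simp [ih]

theorem block_eq (bytes : List Int) (bs s : Int) (hbs : 0 < bs) (hs : 0 ≤ s)
    (hsn : s < (bytes.length : Int)) (hdvd : bs ∣ s) :
    (PySem.List.pyRange s (min (s + bs) (bytes.length : Int)) 1).foldl
        (fun acc i => acc + PySem.List.pyGetD bytes i 0 * (128 : Int) ^ (PySem.Int.mod i bs).toNat) 0
      = pvHorner (PySem.List.slice bytes (some s) (some (s + bs))).reverse 0 := by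
  set e : Int := min (s + bs) (bytes.length : Int) with he
  have hse : s ≤ e := by omega
  set m : Nat := (e - s).toNat with hm
  have hslice : PySem.List.slice bytes (some s) (some (s + bs))
      = (bytes.drop s.toNat).take ((s + bs).toNat - s.toNat) :=
    PySem.List.slice_toNat bytes hs (by omega)
  rw [horner_eq_base128, base128_eq_sum, hslice]
  set chunk : List Int := (bytes.drop s.toNat).take ((s + bs).toNat - s.toNat) with hchunk
  have hclen : chunk.length = m := by
    simp only [hchunk, List.length_take, List.length_drop]
    omega
  rw [foldl_add_eq_sum, zero_add, PySem.List.pyRange_one, List.map_map, hclen]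
  refine congrArg List.sum (List.map_congr_left ?_)
  intro k hk
  have hkm : k < m := List.mem_range.mp hk
  have hik : (0:Int) ≤ s + (k:Int) := by omega
  have hikn : s + (k:Int) < (bytes.length : Int) := by omega
  have hmod : PySem.Int.mod (s + (k:Int)) bs = (k:Int) := by
    rw [PySem.Int.mod_eq_emod_of_pos hbs]
    obtain ⟨q, hq⟩ := hdvd
    rw [hq, add_comm]
    rw [Int.add_mul_emod_self_left]
    exact Int.emod_eq_of_lt (by omega) (by omega)
  simp only [Function.comp]
  rw [hmod]
  rw [PySem.List.pyGetD_eq_getElem bytes 0 hik hikn]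
  have hcg : chunk.getD k 0 = bytes[(s + (k:Int)).toNat] := by
    have hk1 : k < chunk.length := by omega
    rw [List.getD_eq_getElem chunk 0 hk1]
    simp only [hchunk]
    rw [List.getElem_take, List.getElem_drop]
    congr 1
    omega
  rw [hcg]
  simp

-- ===== VERDICT (by name: the statement is the Claim_ definition above) =====
theorem get_blocks_from_text_spec : Claim_equal_get_blocks_from_text := by
  intro message block_size _hDom hPre
  unfold Spec_get_blocks_from_text
  dsimp only [get_blocks_from_text, get_blocks_from_text_alt]
  set bytes : List Int := message.toList.map (fun c => (c.toNat : Int)) with hbytes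
  rcases lt_trichotomy block_size 0 with hneg | hzero | hpos
  · rw [pyRange_neg_nil 0 (bytes.length : Int) block_size hneg (by positivity)]
    rfl
  · exact absurd hzero hPre
  · rw [foldl_append_eq_map, List.nil_append]
    refine List.map_congr_left ?_
    intro s hmem
    obtain ⟨hs0, hsn, hdvd⟩ :=
      (PySem.List.mem_pyRange_iff_of_pos hpos s).mp hmem
    have hdvd' : block_size ∣ s := by simpa using hdvd
    simpa using block_eq bytes block_size s hpos hs0 hsn hdvd'
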